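-- pv_equiv track=rewrite | github.com/Favii4/Pruebas_de_conocimiento | archivoParesImpares.py | num_impares
-- ===== SOURCE A (Python) =====
-- def num_impares(n=20):
--
--     impares=[]
--
--     contador = 0
--     numero = 0
--
--     while contador < n:
--         if numero % 2 != 0:
--             impares.append(numero)
--             contador += 1
--
--         numero += 1
--
--     return impares
-- ===== SOURCE B (Python) =====
-- def num_impares(n=20):
--     return [2 * i + 1 for i in range(n)]
-- ===== Notes on version B (the rewrite author's own statement) =====
-- stated objective: simpler
-- what changed: Replaces the parity-scanning while loop with counter state by a closed-form comprehension computing each odd number directly as 2*i+1 from its index.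
import Mathlib
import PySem

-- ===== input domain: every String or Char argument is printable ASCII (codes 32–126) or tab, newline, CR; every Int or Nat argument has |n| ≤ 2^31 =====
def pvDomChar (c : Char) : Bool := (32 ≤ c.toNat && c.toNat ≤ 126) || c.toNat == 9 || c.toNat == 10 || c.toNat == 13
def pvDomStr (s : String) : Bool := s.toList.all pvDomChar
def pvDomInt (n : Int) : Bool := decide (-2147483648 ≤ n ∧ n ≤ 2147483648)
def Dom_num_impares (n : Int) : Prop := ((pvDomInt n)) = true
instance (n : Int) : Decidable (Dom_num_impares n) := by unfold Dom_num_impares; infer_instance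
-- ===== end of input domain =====

-- ===== PORT A =====
-- while contador < n: if numero % 2 != 0: append numero; contador += 1 ; numero += 1
def numImparesLoop (n contador numero : Int) (acc : List Int) : List Int :=
  if contador < n then
    if numero % 2 ≠ 0 then
      numImparesLoop n (contador + 1) (numero + 1) (acc ++ [numero])
    else
      numImparesLoop n contador (numero + 1) acc
  else acc
termination_by (2 * (n - contador) - numero % 2).toNat
decreasing_by all_goals omega

def num_impares (n : Int) : List Int := numImparesLoop n 0 0 []

-- ===== PORT B =====
def num_impares_alt (n : Int) : List Int :=
  (PySem.List.pyRange 0 n 1).map (fun i => 2 * i + 1)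

-- ===== PRECONDITION & SPEC =====
def Spec_num_impares (n : Int) (out : List Int) : Prop := out = num_impares_alt n
instance (n : Int) (out : List Int) : Decidable (Spec_num_impares n out) := by unfold Spec_num_impares; infer_instance

-- ===== CLAIM (what is proved, stated in full; the proofs are below) =====
def Claim_equal_num_impares : Prop := ∀ (n : Int), Dom_num_impares n → Spec_num_impares n (num_impares n)

-- ===== LEMMAS AND PROOFS =====

-- ===== VERDICT (by name: the statement is the Claim_ definition above) =====
-- Loop characterisation: from state (c, 2c) the loop appends the odds 2i+1 for i in [c, n).
theorem numImparesLoop_eq (n : Int) : ∀ (c : Int) (acc : List Int),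
    numImparesLoop n c (2 * c) acc = acc ++ (PySem.List.pyRange c n 1).map (fun i => 2 * i + 1) := by
  intro c acc
  by_cases h : c < n
  · rw [numImparesLoop, if_pos h, if_neg (by omega)]
    rw [numImparesLoop, if_pos h, if_pos (by omega)]
    have : 2 * c + 1 + 1 = 2 * (c + 1) := by ring
    rw [this, numImparesLoop_eq n (c + 1) (acc ++ [2 * c + 1]),
        PySem.List.pyRange_one_cons h]
    simp
  · rw [numImparesLoop, if_neg h, PySem.List.pyRange_one_eq_nil (by omega)]
    simp
termination_by c => (n - c).toNat
decreasing_by omega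

theorem num_impares_spec : Claim_equal_num_impares := by
  intro n _
  unfold Spec_num_impares num_impares num_impares_alt
  have := numImparesLoop_eq n 0 []
  simpa using this
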